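-- pv_equiv track=rewrite | github.com/DamarisLopes21/PFas | pages/Cineafro.py | remove_numeros_como_letras
-- ===== SOURCE A (Python) =====
-- def remove_numeros_como_letras(texto):
--
--     mapeamento = {
--         '0': 'o',
--         '1': 'i',
--         '!': 'i',
--         '3': 'e',
--         '4': 'a',
--         '5': 's',
--         '7': 't',
--     }
--
--     for numero, letra in mapeamento.items():
--         texto = texto.replace(numero, letra)
--
--     return texto
-- ===== SOURCE B (Python) =====
-- def remove_numeros_como_letras(texto):
--     mapeamento = {
--         '0': 'o',
--         '1': 'i',
--         '!': 'i',
--         '3': 'e',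
--         '4': 'a',
--         '5': 's',
--         '7': 't',
--     }
--     return ''.join(mapeamento.get(c, c) for c in texto)
-- ===== Notes on version B (the rewrite author's own statement) =====
-- stated objective: idiomatic
-- what changed: B makes a single pass over the characters, translating each via mapeamento.get(c, c) and joining, instead of rescanning the whole string with .replace once per mapping entry; equal because no replacement value is itself a key.
import Mathlib
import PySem

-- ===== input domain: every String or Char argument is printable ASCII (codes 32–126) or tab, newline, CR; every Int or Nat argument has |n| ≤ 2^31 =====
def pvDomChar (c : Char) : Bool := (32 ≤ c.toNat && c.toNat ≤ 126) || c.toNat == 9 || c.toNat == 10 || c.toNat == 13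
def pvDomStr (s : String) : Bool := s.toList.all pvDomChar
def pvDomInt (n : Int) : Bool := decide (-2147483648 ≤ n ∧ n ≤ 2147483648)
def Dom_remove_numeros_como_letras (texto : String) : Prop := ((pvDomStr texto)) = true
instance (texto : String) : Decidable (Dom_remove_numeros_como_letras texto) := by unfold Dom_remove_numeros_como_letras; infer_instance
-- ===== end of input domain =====

-- B translates each character in one pass via a per-character lookup instead of seven whole-string .replace scans (idiomatic; same result since no replacement value is a key).


-- ===== PORT A =====
-- the literal dict, as an association list in insertion order
def pvMapeamento : List (String × String) :=
  [("0", "o"), ("1", "i"), ("!", "i"), ("3", "e"), ("4", "a"), ("5", "s"), ("7", "t")]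

-- for numero, letra in mapeamento.items(): texto = texto.replace(numero, letra)
def remove_numeros_como_letras (texto : String) : String :=
  pvMapeamento.foldl (fun t p => PySem.Str.replace t p.1 p.2) texto

-- ===== PORT B =====
-- the same mapping, per character (Python iterates a str as 1-char strings)
def pvMapeamentoChar : PySem.Dict Char Char :=
  PySem.Dict.mk [('0', 'o'), ('1', 'i'), ('!', 'i'), ('3', 'e'), ('4', 'a'), ('5', 's'), ('7', 't')]

-- ''.join(mapeamento.get(c, c) for c in texto)
def remove_numeros_como_letras_alt (texto : String) : String :=
  String.ofList (texto.toList.map (fun c => PySem.Dict.getD pvMapeamentoChar c c))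

-- ===== PRECONDITION & SPEC =====
def Spec_remove_numeros_como_letras (texto : String) (out : String) : Prop := out = remove_numeros_como_letras_alt texto
instance (texto : String) (out : String) : Decidable (Spec_remove_numeros_como_letras texto out) := by unfold Spec_remove_numeros_como_letras; infer_instance

-- ===== CLAIM (what is proved, stated in full; the proofs are below) =====
def Claim_equal_remove_numeros_como_letras : Prop := ∀ (texto : String), Dom_remove_numeros_como_letras texto → Spec_remove_numeros_como_letras texto (remove_numeros_como_letras texto)

-- ===== LEMMAS AND PROOFS =====

-- replace.go with a single-character pattern is a map over the remaining list
theorem pv_go_single (o n : Char) (l acc : List Char) (fuel : Nat) (h : l.length ≤ fuel) :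
    PySem.Chars.replace.go [o] [n] fuel l acc =
      acc.reverse ++ l.map (fun c => if c = o then n else c) := by
  induction l generalizing fuel acc with
  | nil =>
    cases fuel <;> simp [PySem.Chars.replace.go]
  | cons c t ih =>
    cases fuel with
    | zero => simp at h
    | succ f =>
      have hf : t.length ≤ f := Nat.le_of_succ_le_succ (by simpa using h)
      by_cases hc : c = o
      · subst hc
        simp only [PySem.Chars.replace.go, List.isPrefixOf, beq_self_eq_true, Bool.true_and]
        rw [show List.drop [c].length (c :: t) = t from rfl, ih _ _ hf]
        simp
      · simp only [PySem.Chars.replace.go, List.isPrefixOf,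
          show (o == c) = false from beq_eq_false_iff_ne.mpr (fun hh => hc hh.symm),
          Bool.false_and, Bool.false_eq_true, if_false]
        rw [ih _ _ hf]
        simp [hc]

theorem pv_replace_single (cs : List Char) (o n : Char) :
    PySem.Chars.replace cs [o] [n] = cs.map (fun c => if c = o then n else c) := by
  rw [PySem.Chars.replace]
  simp only [List.isEmpty_cons, Bool.false_eq_true, if_false]
  simpa using pv_go_single o n cs [] cs.length le_rfl

-- one single-character substitution, as a named function (proof helper)
def pvSub (o n c : Char) : Char := if c = o then n else c

-- the chain of the seven single-character substitutions is B's per-character lookup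
theorem pv_char_eq (c : Char) :
    pvSub '7' 't' (pvSub '5' 's' (pvSub '4' 'a' (pvSub '3' 'e'
      (pvSub '!' 'i' (pvSub '1' 'i' (pvSub '0' 'o' c)))))) =
      PySem.Dict.getD pvMapeamentoChar c c := by
  by_cases h0 : c = '0'
  · subst h0; decide
  by_cases h1 : c = '1'
  · subst h1; decide
  by_cases h2 : c = '!'
  · subst h2; decide
  by_cases h3 : c = '3'
  · subst h3; decide
  by_cases h4 : c = '4'
  · subst h4; decide
  by_cases h5 : c = '5'
  · subst h5; decide
  by_cases h7 : c = '7'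
  · subst h7; decide
  · simp only [pvSub, if_neg h0, if_neg h1, if_neg h2, if_neg h3, if_neg h4, if_neg h5, if_neg h7,
      PySem.Dict.getD_eq_get?_getD, pvMapeamentoChar, PySem.Dict.get?_mk_cons,
      show ('0' == c) = false from beq_eq_false_iff_ne.mpr (fun hh => h0 hh.symm),
      show ('1' == c) = false from beq_eq_false_iff_ne.mpr (fun hh => h1 hh.symm),
      show ('!' == c) = false from beq_eq_false_iff_ne.mpr (fun hh => h2 hh.symm),
      show ('3' == c) = false from beq_eq_false_iff_ne.mpr (fun hh => h3 hh.symm),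
      show ('4' == c) = false from beq_eq_false_iff_ne.mpr (fun hh => h4 hh.symm),
      show ('5' == c) = false from beq_eq_false_iff_ne.mpr (fun hh => h5 hh.symm),
      show ('7' == c) = false from beq_eq_false_iff_ne.mpr (fun hh => h7 hh.symm),
      Bool.false_eq_true, if_false,
      show (PySem.Dict.mk ([] : List (Char × Char))).get? c = none from rfl, Option.getD_none]

-- the seven whole-list passes collapse into B's single pass
theorem pv_nested (l : List Char) :
    ((((((l.map (pvSub '0' 'o')).map (pvSub '1' 'i')).map (pvSub '!' 'i')).map
        (pvSub '3' 'e')).map (pvSub '4' 'a')).map (pvSub '5' 's')).map (pvSub '7' 't') =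
      l.map (fun c => PySem.Dict.getD pvMapeamentoChar c c) := by
  induction l with
  | nil => rfl
  | cons c t ih =>
    simp only [List.map_cons]
    exact congrArg₂ List.cons (pv_char_eq c) ih

-- ===== VERDICT (by name: the statement is the Claim_ definition above) =====
theorem remove_numeros_como_letras_spec : Claim_equal_remove_numeros_como_letras := by
  intro texto _
  unfold Spec_remove_numeros_como_letras remove_numeros_como_letras remove_numeros_como_letras_alt pvMapeamento
  simp only [List.foldl, PySem.Str.replace, String.toList_ofList,
    show ("0" : String).toList = ['0'] from rfl, show ("o" : String).toList = ['o'] from rfl,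
    show ("1" : String).toList = ['1'] from rfl, show ("i" : String).toList = ['i'] from rfl,
    show ("!" : String).toList = ['!'] from rfl, show ("3" : String).toList = ['3'] from rfl,
    show ("e" : String).toList = ['e'] from rfl, show ("4" : String).toList = ['4'] from rfl,
    show ("a" : String).toList = ['a'] from rfl, show ("5" : String).toList = ['5'] from rfl,
    show ("s" : String).toList = ['s'] from rfl, show ("7" : String).toList = ['7'] from rfl,
    show ("t" : String).toList = ['t'] from rfl, pv_replace_single]
  exact congrArg String.ofList (pv_nested texto.toList)
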